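-- pv_equiv track=rewrite | github.com/safaaltunel/sudoku-game | board.py | check_blocks
-- ===== SOURCE A (Python) =====
-- def check_blocks(block):
-- 	count = 0
-- 	nums = set()
-- 	for num in block:
-- 		if num != 0:
-- 			count += 1
-- 			nums.add(num)
-- 	return count == len(nums)
-- ===== SOURCE B (Python) =====
-- def check_blocks(block):
-- 	nz = sorted(num for num in block if num != 0)
-- 	return all(a != b for a, b in zip(nz, nz[1:]))
-- ===== Notes on version B (the rewrite author's own statement) =====
-- stated objective: alternative
-- what changed: Replaces A's single-pass set construction with count-vs-distinct-count comparison by a sort-then-scan algorithm: sort the nonzero entries and check that no two adjacent sorted values are equal (duplicates in a sorted list are adjacent).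
import Mathlib
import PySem

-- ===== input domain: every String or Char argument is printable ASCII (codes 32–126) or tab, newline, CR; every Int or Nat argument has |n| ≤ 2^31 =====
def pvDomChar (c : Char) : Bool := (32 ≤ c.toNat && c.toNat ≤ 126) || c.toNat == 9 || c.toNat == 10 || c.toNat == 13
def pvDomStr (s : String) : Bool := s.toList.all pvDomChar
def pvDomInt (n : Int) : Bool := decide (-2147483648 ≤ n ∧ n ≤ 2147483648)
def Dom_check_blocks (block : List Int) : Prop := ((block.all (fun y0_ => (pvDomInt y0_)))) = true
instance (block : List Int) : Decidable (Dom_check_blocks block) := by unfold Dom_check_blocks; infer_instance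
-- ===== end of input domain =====

-- B replaces A's set-based count-vs-distinct-count pass by sort-then-adjacent-scan (alternative algorithm).

-- ===== PORT A =====
def check_blocks (block : List Int) : Bool :=
  let st := block.foldl
    (fun (st : Int × PySem.Set Int) num =>
      if num ≠ 0 then (st.1 + 1, PySem.Set.add st.2 num) else st)
    (0, PySem.Set.empty)
  decide (st.1 = PySem.Set.len st.2)

-- ===== PORT B =====
-- all(a != b for a, b in zip(nz, nz[1:])) : scan adjacent pairs
def pvAdjAll (l : List Int) : Bool :=
  match l with
  | a :: b :: t => (decide (a ≠ b)) && pvAdjAll (b :: t)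
  | _ => true

def check_blocks_alt (block : List Int) : Bool :=
  let nz := PySem.List.sorted (block.filter (fun num => decide (num ≠ 0))) (fun x => x) false
  pvAdjAll nz

-- ===== PRECONDITION & SPEC =====
def Spec_check_blocks (block : List Int) (out : Bool) : Prop := out = check_blocks_alt block
instance (block : List Int) (out : Bool) : Decidable (Spec_check_blocks block out) := by unfold Spec_check_blocks; infer_instance

-- ===== CLAIM (what is proved, stated in full; the proofs are below) =====
def Claim_equal_check_blocks : Prop := ∀ (block : List Int), Dom_check_blocks block → Spec_check_blocks block (check_blocks block)

-- ===== LEMMAS AND PROOFS =====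

-- A's foldl, split into count and set components, restricted to the nonzero sublist.
lemma foldlA_split (block : List Int) : ∀ (c : Int) (s : PySem.Set Int),
    block.foldl
      (fun (st : Int × PySem.Set Int) num =>
        if num ≠ 0 then (st.1 + 1, PySem.Set.add st.2 num) else st)
      (c, s)
    = (c + (block.filter (fun num => decide (num ≠ 0))).length,
       (block.filter (fun num => decide (num ≠ 0))).foldl PySem.Set.add s) := by
  induction block with
  | nil => intro c s; simp
  | cons a t ih =>
    intro c s
    by_cases ha : a = 0
    · rw [List.foldl_cons, if_neg (by simp [ha]), List.filter_cons_of_neg (by simp [ha])]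
      exact ih c s
    · rw [List.foldl_cons, if_pos (by simp [ha]), List.filter_cons_of_pos (by simp [ha]),
        ih (c + 1) (PySem.Set.add s a), List.foldl_cons]
      refine Prod.ext ?_ rfl
      simp only [List.length_cons]
      push_cast
      ring

-- length of ofList equals length iff the list has no duplicates
lemma ofList_length_iff (xs : List Int) :
    (PySem.Set.ofList xs).length = xs.length ↔ xs.Nodup := by
  induction xs using List.reverseRecOn with
  | nil => simp [PySem.Set.ofList]
  | append_singleton t a ih =>
    have hof : PySem.Set.ofList (t ++ [a]) = PySem.Set.add (PySem.Set.ofList t) a := by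
      simp [PySem.Set.ofList_eq_foldl]
    by_cases hmem : a ∈ t
    · have hmem' : a ∈ PySem.Set.ofList t := by
        simpa [PySem.Set.mem_ofList] using hmem
      have heq : PySem.Set.add (PySem.Set.ofList t) a = PySem.Set.ofList t :=
        PySem.Set.add_of_mem hmem'
      rw [hof, heq]
      constructor
      · intro h
        exfalso
        have hle := PySem.Set.length_ofList_le (xs := t)
        simp only [List.length_append, List.length_cons, List.length_nil] at h
        omega
      · intro h
        exfalso
        rw [← List.concat_eq_append, List.nodup_concat] at h
        exact h.1 hmem
    · have hmem' : a ∉ PySem.Set.ofList t := by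
        simpa [PySem.Set.mem_ofList] using hmem
      have hadd : PySem.Set.add (PySem.Set.ofList t) a = PySem.Set.ofList t ++ [a] :=
        PySem.Set.add_of_not_mem hmem'
      rw [hof, hadd]
      simp only [List.length_append, List.length_cons, List.length_nil]
      rw [← List.concat_eq_append, List.nodup_concat]
      constructor
      · intro h
        exact ⟨hmem, ih.mp (by omega)⟩
      · intro ⟨_, h1⟩
        have := ih.mpr h1
        omega

-- pvAdjAll is the adjacent-pairs chain of (≠)
lemma pvAdjAll_iff_isChain (l : List Int) :
    pvAdjAll l = true ↔ l.IsChain (· ≠ ·) := by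
  induction l with
  | nil => simp [pvAdjAll]
  | cons a t ih =>
    cases t with
    | nil => simp [pvAdjAll]
    | cons b u =>
      simp only [pvAdjAll, Bool.and_eq_true, decide_eq_true_eq, List.isChain_cons_cons]
      exact and_congr Iff.rfl ih

-- on a (≤)-sorted list, adjacent-distinct is equivalent to Nodup
lemma isChain_ne_iff_nodup_of_sorted (l : List Int)
    (hs : l.Pairwise (· ≤ ·)) : l.IsChain (· ≠ ·) ↔ l.Nodup := by
  constructor
  · intro hc
    have hlt : l.IsChain (· < ·) := by
      have hcs : l.IsChain (· ≤ ·) := List.isChain_iff_pairwise.mpr hs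
      clear hs
      induction l with
      | nil => exact List.isChain_nil
      | cons a t ih =>
        cases t with
        | nil => exact List.isChain_singleton a
        | cons b u =>
          rw [List.isChain_cons_cons] at *
          exact ⟨lt_of_le_of_ne hcs.1 hc.1, ih hc.2 hcs.2⟩
    exact (List.isChain_iff_pairwise.mp hlt).nodup
  · intro hn
    exact hn.isChain

-- ===== VERDICT (by name: the statement is the Claim_ definition above) =====
theorem check_blocks_spec : Claim_equal_check_blocks := by
  intro block _
  show check_blocks block = check_blocks_alt block
  rw [Bool.eq_iff_iff]
  have hA : check_blocks block = true ↔
      (block.filter (fun num => decide (num ≠ 0))).Nodup := by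
    simp only [check_blocks, foldlA_split, PySem.Set.empty, ← PySem.Set.ofList_eq_foldl,
      PySem.Set.len, decide_eq_true_iff]
    rw [← ofList_length_iff]
    omega
  have hperm : (PySem.List.sorted (block.filter (fun num => decide (num ≠ 0)))
      (fun x => x) false).Perm (block.filter (fun num => decide (num ≠ 0))) :=
    PySem.List.sorted_perm _ _ _
  have hB : check_blocks_alt block = true ↔
      (block.filter (fun num => decide (num ≠ 0))).Nodup := by
    rw [check_blocks_alt]
    rw [pvAdjAll_iff_isChain,
      isChain_ne_iff_nodup_of_sorted _
        (by simpa using (PySem.List.sorted_pairwise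
          (xs := block.filter (fun num => decide (num ≠ 0))) (key := fun x => x))),
      hperm.nodup_iff]
  rw [hA, hB]
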